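-- pv_equiv track=rewrite | github.com/eliottcassidy2000/math | 04-computation/lattice_boundary.py | bits_to_adj
-- ===== SOURCE A (Python) =====
-- def bits_to_adj(bits, n):
--     A = [[0]*n for _ in range(n)]
--     idx = 0
--     for i in range(n):
--         for j in range(i+1, n):
--             if bits & (1 << idx):
--                 A[i][j] = 1
--             else:
--                 A[j][i] = 1
--             idx += 1
--     return A
-- ===== SOURCE B (Python) =====
-- def bits_to_adj(bits, n):
--     # Start from the all-backward tournament (A[j][i] = 1 for every pair i < j),
--     # then flip only the edges whose orientation bit is set: the masked bitmask is
--     # consumed row by row (w = n-1-i bits per row) and within a row only its SET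
--     # bits are visited (highest first), each flipping one edge.
--     A = [[1 if j < i else 0 for j in range(n)] for i in range(n)]
--     e = n * (n - 1) // 2 if n > 0 else 0
--     mask = bits & ((1 << e) - 1)
--     i = 0
--     while mask:
--         w = n - 1 - i
--         chunk = mask & ((1 << w) - 1)
--         mask >>= w
--         while chunk:
--             t = chunk.bit_length() - 1
--             chunk -= 1 << t
--             j = i + 1 + t
--             A[i][j] = 1
--             A[j][i] = 0
--         i += 1
--     return A
-- ===== Notes on version B (the rewrite author's own statement) =====
-- stated objective: alternative
-- what changed: Instead of scanning every pair (i,j) with a running bit counter and branching per edge, B prefills the all-backward tournament matrix and then consumes the masked bitmask row by row, visiting only its SET bits (via bit_length) and flipping just those edges.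
import Mathlib
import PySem

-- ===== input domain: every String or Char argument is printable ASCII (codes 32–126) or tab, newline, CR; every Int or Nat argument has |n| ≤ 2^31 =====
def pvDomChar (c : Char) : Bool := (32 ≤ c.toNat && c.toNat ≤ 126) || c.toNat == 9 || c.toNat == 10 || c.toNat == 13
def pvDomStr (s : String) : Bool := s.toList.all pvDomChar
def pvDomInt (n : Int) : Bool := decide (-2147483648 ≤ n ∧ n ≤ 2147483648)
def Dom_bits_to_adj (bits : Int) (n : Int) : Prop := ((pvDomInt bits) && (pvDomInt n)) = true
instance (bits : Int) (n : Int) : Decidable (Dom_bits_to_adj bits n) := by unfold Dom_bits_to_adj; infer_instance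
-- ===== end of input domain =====

-- B replaces A's per-pair double loop (running edge counter, branch writing A[i][j] or A[j][i])
-- by a sparse pass: start from the all-backward tournament and flip only the edges whose bit
-- is set in the masked bitmask, consuming the mask row by row (alternative decomposition).

-- ===== PORT A =====
-- Python's idx starts at 0 and only ever increases, so it is carried as a Nat.
def bits_to_adj (bits : Int) (n : Int) : List (List Int) :=
  (((PySem.List.pyRange 0 n).foldl (fun (st : List (List Int) × Nat) i =>
      (PySem.List.pyRange (i+1) n).foldl (fun st j =>
        if PySem.Int.band bits (1 <<< st.2) ≠ 0 then
          (PySem.List.pySetD st.1 i (PySem.List.pySetD (PySem.List.pyGetD st.1 i []) j 1), st.2+1)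
        else
          (PySem.List.pySetD st.1 j (PySem.List.pySetD (PySem.List.pyGetD st.1 j []) i 1), st.2+1))
        st)
     ((PySem.List.pyRange 0 n).map (fun _ => List.replicate n.toNat (0:Int)), 0))).1

-- ===== PORT B =====
-- Source B's inner `while chunk` loop: chunk and the indices i, j = i+1+t are nonnegative Python
-- ints, carried as Nat; `chunk.bit_length()` is PySem.Int.bitLength, `chunk -= 1 << t` is Nat
-- subtraction (exact: 2^t ≤ chunk), and the two list writes are Python's A[i][j]=1; A[j][i]=0.
def pvChunkLoop (i : Nat) (chunk : Nat) (A : List (List Int)) : List (List Int) :=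
  if h : chunk = 0 then A
  else
    let t := PySem.Int.bitLength (chunk : Int) - 1
    let j := i + 1 + t
    let A1 := A.set i ((A.getD i []).set j 1)
    let A2 := A1.set j ((A1.getD j []).set i 0)
    pvChunkLoop i (chunk - 2^t) A2
termination_by chunk
decreasing_by
  have h1 : 0 < 2 ^ (PySem.Int.bitLength (chunk : Int) - 1) := Nat.two_pow_pos _
  omega

-- Source B's outer `while mask` loop: mask stays a nonnegative Python int (Nat); `mask & ((1<<w)-1)`
-- is `&&& (2^w - 1)` and `mask >>= w` is `>>> w`.  The loop body runs at most m-1 times (mask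
-- always has fewer than e - tri(i) bits), so fuel m only makes the recursion total.
def pvRowsLoop (m : Nat) : Nat → Nat → Nat → List (List Int) → List (List Int)
  | 0, _, _, A => A
  | f+1, i, mask, A =>
    if mask = 0 then A
    else
      let w := m - 1 - i
      let chunk := mask &&& (2^w - 1)
      pvRowsLoop m f (i+1) (mask >>> w) (pvChunkLoop i chunk A)

-- The bitmask `bits & ((1 << e) - 1)` and `e` are nonnegative Python ints, carried as Nat.
def bits_to_adj_alt (bits : Int) (n : Int) : List (List Int) :=
  let A0 := (PySem.List.pyRange 0 n).map (fun i =>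
    (PySem.List.pyRange 0 n).map (fun j => if j < i then (1:Int) else 0))
  let e : Nat := if 0 < n then (PySem.Int.floordiv (n*(n-1)) 2).toNat else 0
  let mask : Nat := (PySem.Int.band bits ((1 <<< e) - 1)).toNat
  pvRowsLoop n.toNat n.toNat 0 mask A0

-- ===== PRECONDITION & SPEC =====
def Spec_bits_to_adj (bits : Int) (n : Int) (out : List (List Int)) : Prop := out = bits_to_adj_alt bits n
instance (bits : Int) (n : Int) (out : List (List Int)) : Decidable (Spec_bits_to_adj bits n out) := by unfold Spec_bits_to_adj; infer_instance

-- ===== CLAIM (what is proved, stated in full; the proofs are below) =====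
def Claim_equal_bits_to_adj : Prop := ∀ (bits : Int) (n : Int), Dom_bits_to_adj bits n → Spec_bits_to_adj bits n (bits_to_adj bits n)

-- ===== LEMMAS AND PROOFS =====

def pvStep (bits : Int) (r c : Nat) (st : List (List Int) × Nat) : List (List Int) × Nat :=
  if PySem.Int.band bits (1 <<< st.2) ≠ 0 then
    (st.1.set r ((st.1.getD r []).set c 1), st.2+1)
  else
    (st.1.set c ((st.1.getD c []).set r 1), st.2+1)

def pvOuter (bits : Int) (m : Nat) : List (List Int) × Nat :=
  (List.range m).foldl
    (fun st r => (List.range (m-(r+1))).foldl (fun st k => pvStep bits r (r+1+k) st) st)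
    (List.replicate m (List.replicate m 0), 0)

lemma a_fold (bits : Int) (m : Nat) : bits_to_adj bits (m : Int) = (pvOuter bits m).1 := by
  unfold bits_to_adj pvOuter
  rw [PySem.List.pyRange_zero]
  simp only [Int.toNat_natCast, List.foldl_map, List.map_map]
  have hinit : (List.range m).map ((fun _ => List.replicate m (0:Int)) ∘ fun (k:Nat) => ((k:Int))) = List.replicate m (List.replicate m 0) := by
    simp [Function.comp_def, List.map_const']
  rw [hinit]
  congr 1
  congr 1
  funext st r
  rw [PySem.List.pyRange_one]
  have : ((m:Int) - ((r:Int)+1)).toNat = m - (r+1) := by omega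
  rw [this, List.foldl_map]
  congr 1
  funext st k
  have hc : ((r:Int) + 1 + (k:Int)) = ((r+1+k : Nat) : Int) := by push_cast; ring
  rw [hc]; simp only [pvStep, PySem.List.pySetD_natCast, PySem.List.pyGetD_natCast]

def pvTri (m r : Nat) : Nat := r * (m - 1) - r * (r - 1) / 2
def pvOff (m r c : Nat) : Nat := pvTri m r + (c - r - 1)
def pvBit (bits : Int) (k : Nat) : Int := if PySem.Int.band bits (1 <<< k) ≠ 0 then 1 else 0
def pvTgt (bits : Int) (m a b : Nat) : Int :=
  if a < b then pvBit bits (pvOff m a b)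
  else if b < a then 1 - pvBit bits (pvOff m b a) else 0

def pvGet2 (M : List (List Int)) (a b : Nat) : Int := (M.getD a []).getD b 0

def pvShape (M : List (List Int)) (m : Nat) : Prop := M.length = m ∧ ∀ row ∈ M, row.length = m

lemma pv_getD_mem {M : List (List Int)} {m x : Nat} (h : pvShape M m) (hx : x < m) :
    M.getD x [] ∈ M := by
  rw [List.getD_eq_getElem M [] (by rw [h.1]; omega)]
  exact List.getElem_mem _

lemma pv_shape_set {M : List (List Int)} {m x y : Nat} {v : Int} (h : pvShape M m)
    (hx : x < m) (_hy : y < m) : pvShape (M.set x ((M.getD x []).set y v)) m := by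
  constructor
  · simp [h.1]
  · intro row hrow
    rcases List.mem_or_eq_of_mem_set hrow with h1 | h1
    · exact h.2 row h1
    · subst h1
      rw [List.length_set]
      exact h.2 _ (pv_getD_mem h hx)

lemma pv_getD_set {α : Type} (l : List α) (i j : Nat) (v d : α) (hj : j < l.length) :
    (l.set i v).getD j d = if i = j then v else l.getD j d := by
  rw [List.getD_eq_getElem _ d (by rw [List.length_set]; exact hj),
      List.getElem_set, List.getD_eq_getElem l d hj]

lemma pv_get2_set {M : List (List Int)} {m x y a b : Nat} {v : Int} (h : pvShape M m)
    (hx : x < m) (_hy : y < m) (ha : a < m) (hb : b < m) :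
    pvGet2 (M.set x ((M.getD x []).set y v)) a b
      = if a = x ∧ b = y then v else pvGet2 M a b := by
  obtain ⟨hlen, hrow⟩ := h
  have ha' : a < M.length := by omega
  have hrx : (M.getD x []).length = m := hrow _ (pv_getD_mem ⟨hlen, hrow⟩ hx)
  have hra : (M.getD a []).length = m := hrow _ (pv_getD_mem ⟨hlen, hrow⟩ ha)
  unfold pvGet2
  rw [pv_getD_set M x a _ [] ha']
  by_cases hax : x = a
  · subst hax
    rw [if_pos rfl, pv_getD_set _ y b v 0 (by rw [hrx]; omega)]
    by_cases hby : y = b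
    · subst hby; simp
    · rw [if_neg hby, if_neg (by tauto)]
  · rw [if_neg hax, if_neg (by tauto)]

lemma pvTgt_diag (bits : Int) (m a : Nat) : pvTgt bits m a a = 0 := by
  simp [pvTgt]

lemma pv_inner (bits : Int) (m r : Nat) (hr : r < m) (A : List (List Int))
    (hsh : pvShape A m)
    (hA : ∀ a b, a < m → b < m →
      pvGet2 A a b = if min a b < r then pvTgt bits m a b else 0) :
    ∀ t, t ≤ m - (r+1) →
      (let st := (List.range t).foldl (fun st k => pvStep bits r (r+1+k) st) (A, pvTri m r)
       pvShape st.1 m ∧ st.2 = pvTri m r + t ∧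
       ∀ a b, a < m → b < m →
         pvGet2 st.1 a b =
           if min a b < r ∨ (min a b = r ∧ max a b < r+1+t) then pvTgt bits m a b else 0) := by
  intro t
  induction t with
  | zero =>
    intro _
    simp only [List.range_zero, List.foldl_nil]
    refine ⟨hsh, by simp, ?_⟩
    intro a b ha hb
    rw [hA a b ha hb]
    by_cases h1 : min a b < r
    · simp [h1]
    · rw [if_neg h1]
      by_cases h2 : min a b = r ∧ max a b < r + 1 + 0
      · have hab : a = b := by omega
        subst hab
        rw [if_pos (Or.inr h2), pvTgt_diag]
      · rw [if_neg (by tauto)]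
  | succ t ih =>
    intro ht
    have ht' : t ≤ m - (r+1) := by omega
    obtain ⟨hsh', hidx', hent'⟩ := ih ht'
    set st := (List.range t).foldl (fun st k => pvStep bits r (r+1+k) st) (A, pvTri m r) with hst
    have hfold : (List.range (t+1)).foldl (fun st k => pvStep bits r (r+1+k) st) (A, pvTri m r)
        = pvStep bits r (r+1+t) st := by
      rw [List.range_succ, List.foldl_append]
      rfl
    rw [hfold]
    have hc : r + 1 + t < m := by omega
    have hoff : st.2 = pvOff m r (r+1+t) := by
      rw [hidx']; unfold pvOff pvTri; omega
    unfold pvStep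
    by_cases hbit : PySem.Int.band bits (1 <<< st.2) ≠ 0
    · rw [if_pos hbit]
      refine ⟨pv_shape_set hsh' hr hc, by show st.2 + 1 = pvTri m r + (t+1); omega, ?_⟩
      intro a b ha hb
      have := pv_get2_set (v := 1) (y := r+1+t) (x := r) hsh' hr hc ha hb
      rw [show pvGet2 ((st.1.set r ((st.1.getD r []).set (r+1+t) 1)), st.2+1).1 a b
            = pvGet2 (st.1.set r ((st.1.getD r []).set (r+1+t) 1)) a b from rfl, this]
      by_cases hw : a = r ∧ b = r+1+t
      · rw [if_pos hw, hw.1, hw.2, if_pos (by omega)]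
        have : pvTgt bits m r (r+1+t) = pvBit bits (pvOff m r (r+1+t)) := by
          unfold pvTgt; rw [if_pos (by omega)]
        rw [this, pvBit, if_pos (by rwa [hoff] at hbit)]
      · rw [if_neg hw, hent' a b ha hb]
        by_cases h1 : min a b < r
        · simp [h1]
        · by_cases h2 : min a b = r ∧ max a b < r+1+t
          · rw [if_pos (Or.inr h2), if_pos (Or.inr ⟨h2.1, by omega⟩)]
          · by_cases h3 : min a b = r ∧ max a b < r+1+(t+1)
            · have hmir : a = r+1+t ∧ b = r := by
                rcases h3 with ⟨hmin, hmax⟩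
                rcases Nat.le_total a b with hab | hab
                · exfalso
                  rcases (by omega : a = r) with rfl
                  exact hw ⟨rfl, by omega⟩
                · constructor <;> omega
              rw [if_neg (not_or_intro h1 h2), if_pos (Or.inr h3), hmir.1, hmir.2]
              have : pvTgt bits m (r+1+t) r = 1 - pvBit bits (pvOff m r (r+1+t)) := by
                unfold pvTgt; rw [if_neg (by omega), if_pos (by omega)]
              rw [this, pvBit, if_pos (by rwa [hoff] at hbit)]
              norm_num
            · rw [if_neg (by tauto), if_neg (by tauto)]
    · rw [if_neg hbit]
      refine ⟨pv_shape_set hsh' hc hr, by show st.2 + 1 = pvTri m r + (t+1); omega, ?_⟩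
      intro a b ha hb
      have := pv_get2_set (v := 1) (y := r) (x := r+1+t) hsh' hc hr ha hb
      rw [show pvGet2 ((st.1.set (r+1+t) ((st.1.getD (r+1+t) []).set r 1)), st.2+1).1 a b
            = pvGet2 (st.1.set (r+1+t) ((st.1.getD (r+1+t) []).set r 1)) a b from rfl, this]
      by_cases hw : a = r+1+t ∧ b = r
      · rw [if_pos hw, hw.1, hw.2, if_pos (by omega)]
        have : pvTgt bits m (r+1+t) r = 1 - pvBit bits (pvOff m r (r+1+t)) := by
          unfold pvTgt; rw [if_neg (by omega), if_pos (by omega)]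
        rw [this, pvBit, if_neg (by rwa [hoff] at hbit)]
        norm_num
      · rw [if_neg hw, hent' a b ha hb]
        by_cases h1 : min a b < r
        · simp [h1]
        · by_cases h2 : min a b = r ∧ max a b < r+1+t
          · rw [if_pos (Or.inr h2), if_pos (Or.inr ⟨h2.1, by omega⟩)]
          · by_cases h3 : min a b = r ∧ max a b < r+1+(t+1)
            · have hmir : a = r ∧ b = r+1+t := by
                rcases h3 with ⟨hmin, hmax⟩
                rcases Nat.le_total b a with hab | hab
                · exfalso
                  rcases (by omega : b = r) with hbr
                  exact hw ⟨by omega, hbr⟩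
                · constructor <;> omega
              rw [if_neg (not_or_intro h1 h2), if_pos (Or.inr h3), hmir.1, hmir.2]
              have : pvTgt bits m r (r+1+t) = pvBit bits (pvOff m r (r+1+t)) := by
                unfold pvTgt; rw [if_pos (by omega)]
              rw [this, pvBit, if_neg (by rwa [hoff] at hbit)]
            · rw [if_neg (by tauto), if_neg (by tauto)]

lemma pvTri_succ (m r : Nat) (hr : r < m) : pvTri m r + (m - (r+1)) = pvTri m (r+1) := by
  unfold pvTri
  simp only [Nat.add_sub_cancel]
  have h1 : (r+1) * (m-1) = r * (m-1) + (m-1) := by ring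
  have h2 : (r+1) * r = r * (r-1) + 2 * r := by
    cases r with
    | zero => simp
    | succ u => simp only [Nat.succ_sub_one]; ring
  have h3 : (r+1) * r / 2 = r * (r-1) / 2 + r := by
    rw [h2, Nat.add_mul_div_left _ _ (by norm_num : (0:Nat) < 2)]
  have h4 : r * (r-1) ≤ r * (m-1) := Nat.mul_le_mul_left r (by omega)
  have h5 : r * (r-1) / 2 ≤ r * (r-1) := Nat.div_le_self _ _
  have h6 : (r+1) * r ≤ (r+1) * (m-1) := Nat.mul_le_mul_left (r+1) (by omega)
  have h7 : (r+1) * r / 2 ≤ (r+1) * r := Nat.div_le_self _ _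
  omega

lemma pv_outer (bits : Int) (m : Nat) : ∀ r, r ≤ m →
    (let st := (List.range r).foldl
        (fun st r => (List.range (m-(r+1))).foldl (fun st k => pvStep bits r (r+1+k) st) st)
        (List.replicate m (List.replicate m 0), 0)
     pvShape st.1 m ∧ st.2 = pvTri m r ∧
     ∀ a b, a < m → b < m →
       pvGet2 st.1 a b = if min a b < r then pvTgt bits m a b else 0) := by
  intro r
  induction r with
  | zero =>
    intro _
    simp only [List.range_zero, List.foldl_nil]
    refine ⟨⟨by simp, by intro row h; rw [List.eq_of_mem_replicate h]; simp⟩, by simp [pvTri], ?_⟩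
    intro a b ha hb
    rw [if_neg (by omega)]
    unfold pvGet2
    rw [List.getD_eq_getElem _ [] (by simp; omega), List.getElem_replicate,
        List.getD_eq_getElem _ 0 (by simp; omega), List.getElem_replicate]
  | succ r ih =>
    intro hr
    have hr' : r < m := by omega
    obtain ⟨hsh, hidx, hent⟩ := ih (by omega)
    rw [List.range_succ, List.foldl_append]
    set st := (List.range r).foldl
        (fun st r => (List.range (m-(r+1))).foldl (fun st k => pvStep bits r (r+1+k) st) st)
        (List.replicate m (List.replicate m 0), 0) with hst
    simp only [List.foldl_cons, List.foldl_nil]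
    have hst2 : st = (st.1, pvTri m r) := by
      rw [← hidx]
    rw [hst2]
    obtain ⟨hsh', hidx', hent'⟩ := pv_inner bits m r hr' st.1 hsh
      (by intro a b ha hb; rw [← hent a b ha hb]) (m - (r+1)) (le_refl _)
    refine ⟨hsh', by rw [hidx', pvTri_succ m r hr'], ?_⟩
    intro a b ha hb
    rw [hent' a b ha hb]
    by_cases h1 : min a b < r
    · rw [if_pos (Or.inl h1), if_pos (by omega)]
    · by_cases h2 : min a b = r ∧ max a b < r + 1 + (m - (r+1))
      · rw [if_pos (Or.inr h2), if_pos (by omega)]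
      · rw [if_neg (not_or_intro h1 h2), if_neg (by omega)]

-- ---- B-side lemmas ----

lemma pv_complBit : ∀ (e k x : Nat), x < 2^e → k < e → (2^e - 1 - x).testBit k = !x.testBit k := by
  intro e
  induction e with
  | zero => intro k x _ hk; omega
  | succ e ih =>
    intro k x hx hk
    cases k with
    | zero =>
      simp only [Nat.testBit_zero]
      have h2 : 2^(e+1) = 2*2^e := by ring
      have : (2^(e+1) - 1 - x) % 2 = 1 - x % 2 := by omega
      rw [this]
      rcases Nat.mod_two_eq_zero_or_one x with h | h <;> simp [h]
    | succ k =>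
      rw [Nat.testBit_succ, Nat.testBit_succ]
      have h2 : 2^(e+1) = 2*2^e := by ring
      have hdiv : (2^(e+1) - 1 - x) / 2 = 2^e - 1 - x/2 := by omega
      rw [hdiv, ih k (x/2) (by omega) (by omega)]

lemma pv_band_negSucc (b N : Nat) :
    PySem.Int.band (Int.negSucc b) (N:Nat) = ((N - (b &&& N) : Nat) : Int) := by
  have hneg : ¬ (0 ≤ Int.negSucc b) := of_decide_eq_false rfl
  have hx : (-Int.negSucc b - 1).toNat = b := by rw [Int.negSucc_eq]; omega
  simp only [PySem.Int.band, hneg, if_false,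
    if_pos (show (0:Int) ≤ ((N:Nat):Int) by positivity), hx, Int.toNat_natCast, Nat.and_comm]

lemma pv_shl_one (e : Nat) : (((1 <<< e : Nat) : Int)) - 1 = (((2^e - 1 : Nat)) : Int) := by
  rw [Nat.one_shiftLeft]
  have : 1 ≤ 2^e := Nat.one_le_two_pow
  push_cast [this]
  ring

def pvMask (bits : Int) (e : Nat) : Nat := (PySem.Int.band bits ((1 <<< e) - 1)).toNat

lemma pv_mask_lt (bits : Int) (e : Nat) : pvMask bits e < 2^e := by
  unfold pvMask
  rw [pv_shl_one]
  cases bits with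
  | ofNat b =>
    have : PySem.Int.band (Int.ofNat b) ((2^e - 1 : Nat) : Int) = ((b &&& (2^e - 1) : Nat) : Int) := by
      exact_mod_cast PySem.Int.band_natCast b (2^e - 1)
    rw [this, Int.toNat_natCast]
    have := Nat.and_le_right (n := b) (m := 2^e - 1)
    have h1 : 1 ≤ 2^e := Nat.one_le_two_pow
    omega
  | negSucc b =>
    rw [pv_band_negSucc, Int.toNat_natCast]
    have h1 : 1 ≤ 2^e := Nat.one_le_two_pow
    omega

lemma pv_mask_testBit (bits : Int) (e k : Nat) (hk : k < e) :
    pvBit bits k = if (pvMask bits e).testBit k then 1 else 0 := by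
  unfold pvMask pvBit
  rw [pv_shl_one]
  cases bits with
  | ofNat b =>
    have hband : PySem.Int.band (Int.ofNat b) ((2^e - 1 : Nat) : Int) = ((b &&& (2^e - 1) : Nat) : Int) := by
      exact_mod_cast PySem.Int.band_natCast b (2^e - 1)
    have hbk : PySem.Int.band (Int.ofNat b) (((1 <<< k : Nat)) : Int) = ((b &&& 2^k : Nat) : Int) := by
      rw [Nat.one_shiftLeft]
      exact_mod_cast PySem.Int.band_natCast b (2^k)
    rw [hband, Int.toNat_natCast, hbk, Nat.testBit_and, Nat.testBit_two_pow_sub_one,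
        decide_eq_true (show k < e from hk), Bool.and_true, Nat.and_two_pow]
    cases h : b.testBit k <;> simp
  | negSucc b =>
    rw [pv_band_negSucc b (2^e - 1), Int.toNat_natCast]
    have hx : b &&& (2^e - 1) < 2^e := by
      have := Nat.and_le_right (n := b) (m := 2^e - 1)
      have h1 : 1 ≤ 2^e := Nat.one_le_two_pow
      omega
    rw [pv_complBit e k _ hx hk, Nat.testBit_and, Nat.testBit_two_pow_sub_one,
        decide_eq_true (show k < e from hk), Bool.and_true,
        Nat.one_shiftLeft, pv_band_negSucc b (2^k), Nat.and_two_pow]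
    cases h : b.testBit k <;> simp

lemma pv_tri_mono (m i j : Nat) (hij : i ≤ j) (hjm : j ≤ m) : pvTri m i ≤ pvTri m j := by
  revert hij hjm
  induction j with
  | zero =>
    intro hij _
    have h : i = 0 := by omega
    subst h
    exact le_refl _
  | succ j ih =>
    intro hij hjm
    by_cases h : i = j + 1
    · subst h; exact le_refl _
    · have h1 := ih (by omega) (by omega)
      have h2 := pvTri_succ m j (by omega)
      omega

lemma pv_tri_zero (m : Nat) : pvTri m 0 = 0 := by simp [pvTri]

lemma pv_tri_last (m : Nat) (hm : 1 ≤ m) : pvTri m (m-1) = pvTri m m := by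
  have h1 := pvTri_succ m (m-1) (by omega)
  have h : m - (m-1+1) = 0 := by omega
  rw [h] at h1
  have h2 : m - 1 + 1 = m := by omega
  rw [h2] at h1
  omega

lemma pv_off_lt (m a b : Nat) (hab : a < b) (hb : b < m) : pvOff m a b < pvTri m m := by
  have h1 := pvTri_succ m a (by omega)
  have h2 := pv_tri_mono m (a+1) m (by omega) (le_refl m)
  unfold pvOff
  omega

lemma pv_topBit (M : Nat) (hM : M ≠ 0) :
    2^(PySem.Int.bitLength (M : Int) - 1) ≤ M ∧ M < 2^(PySem.Int.bitLength (M : Int) - 1 + 1) ∧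
    M.testBit (PySem.Int.bitLength (M : Int) - 1) = true ∧
    M - 2^(PySem.Int.bitLength (M : Int) - 1) < 2^(PySem.Int.bitLength (M : Int) - 1) ∧
    (∀ s, (M - 2^(PySem.Int.bitLength (M : Int) - 1)).testBit s =
      if s = PySem.Int.bitLength (M : Int) - 1 then false else M.testBit s) := by
  set t := PySem.Int.bitLength (M : Int) - 1 with hT
  have hlow : 2^t ≤ M := by
    have := PySem.Int.two_pow_bitLength_le (M:Int) (by exact_mod_cast hM)
    simpa using this
  have hbl1 : 1 ≤ PySem.Int.bitLength (M:Int) := by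
    by_contra h
    have h0 : PySem.Int.bitLength (M:Int) = 0 := by omega
    have := PySem.Int.lt_two_pow_bitLength (M:Int)
    rw [h0] at this
    simp at this
    omega
  have hhigh : M < 2^(t+1) := by
    have h1 := PySem.Int.lt_two_pow_bitLength (M:Int)
    have ht1 : t + 1 = PySem.Int.bitLength (M:Int) := by omega
    rw [ht1]
    simpa using h1
  have hr : M - 2^t < 2^t := by
    have : 2^(t+1) = 2^t + 2^t := by ring
    omega
  have hMeq : M = 2^t + (M - 2^t) := by omega
  have htb : M.testBit t = true := by
    conv_lhs => rw [hMeq]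
    rw [Nat.testBit_two_pow_add_eq, Nat.testBit_lt_two_pow hr]
    rfl
  refine ⟨hlow, hhigh, htb, hr, ?_⟩
  intro s
  by_cases hs : s = t
  · subst hs
    rw [if_pos rfl, Nat.testBit_lt_two_pow hr]
  · rw [if_neg hs]
    rcases Nat.lt_or_ge s t with h | h
    · conv_rhs => rw [hMeq]
      rw [Nat.testBit_two_pow_add_gt h]
    · have hst : t < s := by omega
      have h1 : M - 2^t < 2^s := by
        have : 2^t ≤ 2^s := Nat.pow_le_pow_right (by norm_num) (by omega)
        omega
      have h2 : M < 2^s := by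
        have : 2^(t+1) ≤ 2^s := Nat.pow_le_pow_right (by norm_num) (by omega)
        omega
      rw [Nat.testBit_lt_two_pow h1, Nat.testBit_lt_two_pow h2]

lemma pv_chunk_char (m i : Nat) (hi : i + 1 ≤ m) :
    ∀ chunk A, chunk < 2^(m-1-i) → pvShape A m →
      pvShape (pvChunkLoop i chunk A) m ∧
      ∀ a b, a < m → b < m →
        pvGet2 (pvChunkLoop i chunk A) a b =
          if a = i ∧ i < b ∧ chunk.testBit (b-i-1) then 1
          else if b = i ∧ i < a ∧ chunk.testBit (a-i-1) then 0
          else pvGet2 A a b := by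
  intro chunk
  induction chunk using Nat.strong_induction_on with
  | _ chunk ih =>
    intro A hlt hsh
    rw [pvChunkLoop]
    by_cases h0 : chunk = 0
    · subst h0
      rw [dif_pos rfl]
      refine ⟨hsh, ?_⟩
      intro a b ha hb
      simp [Nat.zero_testBit]
    · rw [dif_neg h0]
      obtain ⟨hlow, hhigh, htb, hrem, hbits⟩ := pv_topBit chunk h0
      set t := PySem.Int.bitLength (chunk : Int) - 1 with hT
      have htw : t < m - 1 - i := by
        by_contra h
        have : 2^(m-1-i) ≤ 2^t := Nat.pow_le_pow_right (by norm_num) (by omega)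
        omega
      have hj : i + 1 + t < m := by omega
      set A1 := A.set i ((A.getD i []).set (i+1+t) 1) with hA1
      set A2 := A1.set (i+1+t) ((A1.getD (i+1+t) []).set i 0) with hA2
      have hsh1 : pvShape A1 m := pv_shape_set hsh (by omega) hj
      have hsh2 : pvShape A2 m := pv_shape_set hsh1 hj (by omega)
      obtain ⟨hshR, hentR⟩ := ih (chunk - 2^t) (by have := Nat.two_pow_pos t; omega)
        A2 (by have : 2^t ≤ 2^(m-1-i) := Nat.pow_le_pow_right (by norm_num) (by omega); omega) hsh2
      refine ⟨hshR, ?_⟩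
      intro a b ha hb
      rw [hentR a b ha hb]
      have hg2 : pvGet2 A2 a b = if a = i+1+t ∧ b = i then 0 else pvGet2 A1 a b :=
        pv_get2_set hsh1 hj (by omega) ha hb
      have hg1 : pvGet2 A1 a b = if a = i ∧ b = i+1+t then 1 else pvGet2 A a b :=
        pv_get2_set hsh (by omega) hj ha hb
      by_cases hc1 : a = i ∧ i < b ∧ chunk.testBit (b-i-1)
      · rw [if_pos hc1]
        by_cases hbt : b - i - 1 = t
        · have hbj : b = i + 1 + t := by omega
          rw [if_neg (by rw [hbits, if_pos hbt]; simp), if_neg (by omega), hg2,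
              if_neg (by omega), hg1, if_pos ⟨hc1.1, hbj⟩]
        · rw [if_pos ⟨hc1.1, hc1.2.1, by rw [hbits, if_neg hbt]; exact hc1.2.2⟩]
      · rw [if_neg hc1]
        by_cases hc2 : b = i ∧ i < a ∧ chunk.testBit (a-i-1)
        · rw [if_pos hc2]
          obtain ⟨hbi, hia, htb2⟩ := hc2
          have hfneg : ¬ (a = i ∧ i < b ∧ (chunk - 2^t).testBit (b-i-1)) := by
            rintro ⟨-, hx, -⟩; omega
          by_cases hat : a - i - 1 = t
          · have haj : a = i + 1 + t := by omega
            rw [if_neg hfneg, if_neg (by rw [hbits, if_pos hat]; simp), hg2, if_pos ⟨haj, hbi⟩]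
          · rw [if_neg hfneg, if_pos ⟨hbi, hia, by rw [hbits, if_neg hat]; exact htb2⟩]
        · rw [if_neg hc2]
          have hna : ¬ (a = i ∧ i < b ∧ (chunk - 2^t).testBit (b-i-1)) := by
            rintro ⟨hx1, hx2, hx3⟩
            rw [hbits] at hx3
            by_cases hbt : b - i - 1 = t
            · rw [if_pos hbt] at hx3; exact absurd hx3 (by simp)
            · rw [if_neg hbt] at hx3; exact hc1 ⟨hx1, hx2, hx3⟩
          have hnb : ¬ (b = i ∧ i < a ∧ (chunk - 2^t).testBit (a-i-1)) := by
            rintro ⟨hx1, hx2, hx3⟩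
            rw [hbits] at hx3
            by_cases hat : a - i - 1 = t
            · rw [if_pos hat] at hx3; exact absurd hx3 (by simp)
            · rw [if_neg hat] at hx3; exact hc2 ⟨hx1, hx2, hx3⟩
          rw [if_neg hna, if_neg hnb, hg2, hg1]
          have hn2 : ¬ (a = i+1+t ∧ b = i) := by
            rintro ⟨hx1, hx2⟩
            exact hc2 ⟨hx2, by omega, by rw [show a - i - 1 = t by omega]; exact htb⟩
          have hn1 : ¬ (a = i ∧ b = i+1+t) := by
            rintro ⟨hx1, hx2⟩
            exact hc1 ⟨hx1, by omega, by rw [show b - i - 1 = t by omega]; exact htb⟩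
          rw [if_neg hn2, if_neg hn1]

lemma pv_rows_char (m : Nat) (hm : 1 ≤ m) :
    ∀ f i mask A, i ≤ m-1 → m-1-i < f → mask < 2^(pvTri m m - pvTri m i) → pvShape A m →
      pvShape (pvRowsLoop m f i mask A) m ∧
      ∀ a b, a < m → b < m →
        pvGet2 (pvRowsLoop m f i mask A) a b =
          if a < b ∧ i ≤ a ∧ mask.testBit (pvOff m a b - pvTri m i) then 1
          else if b < a ∧ i ≤ b ∧ mask.testBit (pvOff m b a - pvTri m i) then 0
          else pvGet2 A a b := by
  intro f
  induction f with
  | zero => intro i mask A _ hf _ _; omega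
  | succ f ih =>
    intro i mask A hi hf hmask hsh
    rw [pvRowsLoop]
    by_cases h0 : mask = 0
    · subst h0
      rw [if_pos rfl]
      refine ⟨hsh, ?_⟩
      intro a b ha hb
      simp [Nat.zero_testBit]
    · rw [if_neg h0]
      have him : i < m - 1 := by
        by_contra h
        have hie : i = m - 1 := by omega
        rw [hie, pv_tri_last m hm] at hmask
        simp at hmask
        omega
      set w := m - 1 - i with hw
      have hw1 : 1 ≤ w := by omega
      have htriS : pvTri m i + w = pvTri m (i+1) := by
        have := pvTri_succ m i (by omega)
        omega
      have htriL : pvTri m (i+1) ≤ pvTri m m := pv_tri_mono m (i+1) m (by omega) (le_refl m)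
      set chunk := mask &&& (2^w - 1) with hchunk
      have hchlt : chunk < 2^w := by
        have h1 := Nat.and_le_right (n := mask) (m := 2^w - 1)
        have h2 : 1 ≤ 2^w := Nat.one_le_two_pow
        omega
      obtain ⟨hsh', hent'⟩ := pv_chunk_char m i (by omega) chunk A hchlt hsh
      have hshift : mask >>> w < 2^(pvTri m m - pvTri m (i+1)) := by
        rw [Nat.shiftRight_eq_div_pow]
        have hlt : mask < 2^w * 2^(pvTri m m - pvTri m (i+1)) := by
          rw [← Nat.pow_add]
          have he : w + (pvTri m m - pvTri m (i+1)) = pvTri m m - pvTri m i := by omega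
          rw [he]; exact hmask
        exact Nat.div_lt_of_lt_mul hlt
      obtain ⟨hshR, hentR⟩ := ih (i+1) (mask >>> w) (pvChunkLoop i chunk A)
        (by omega) (by omega) hshift hsh'
      refine ⟨hshR, ?_⟩
      intro a b ha hb
      rw [hentR a b ha hb, hent' a b ha hb]
      have hsb : ∀ x y : Nat, x < y → y < m → i + 1 ≤ x →
          (mask >>> w).testBit (pvOff m x y - pvTri m (i+1)) = mask.testBit (pvOff m x y - pvTri m i) := by
        intro x y hxy hym hx1
        rw [Nat.testBit_shiftRight]
        congr 1
        have hox : pvTri m (i+1) ≤ pvOff m x y := by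
          have h1 : pvTri m (i+1) ≤ pvTri m x := pv_tri_mono m (i+1) x hx1 (by omega)
          unfold pvOff
          omega
        omega
      have hcb : ∀ y : Nat, i < y → y < m →
          chunk.testBit (y-i-1) = mask.testBit (pvOff m i y - pvTri m i) := by
        intro y hy hym
        have hsm : y - i - 1 < w := by omega
        rw [hchunk, Nat.testBit_and, Nat.testBit_two_pow_sub_one,
            decide_eq_true hsm, Bool.and_true]
        congr 1
        unfold pvOff
        omega
      rcases Nat.lt_trichotomy a b with hab | hab | hab
      · have hL2 : ¬(b < a ∧ i+1 ≤ b ∧ (mask >>> w).testBit (pvOff m b a - pvTri m (i+1)) = true) := by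
          rintro ⟨h, -, -⟩; omega
        have hC2 : ¬(b = i ∧ i < a ∧ chunk.testBit (a-i-1) = true) := by
          rintro ⟨h1, h2, -⟩; omega
        have hR2 : ¬(b < a ∧ i ≤ b ∧ mask.testBit (pvOff m b a - pvTri m i) = true) := by
          rintro ⟨h, -, -⟩; omega
        rcases Nat.lt_trichotomy a i with hai | hai | hai
        · rw [if_neg (by rintro ⟨-, h, -⟩; omega : ¬(a < b ∧ i+1 ≤ a ∧ (mask >>> w).testBit (pvOff m a b - pvTri m (i+1)) = true)),
              if_neg hL2,
              if_neg (by rintro ⟨h, -, -⟩; omega : ¬(a = i ∧ i < b ∧ chunk.testBit (b-i-1) = true)),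
              if_neg hC2,
              if_neg (by rintro ⟨-, h, -⟩; omega : ¬(a < b ∧ i ≤ a ∧ mask.testBit (pvOff m a b - pvTri m i) = true)),
              if_neg hR2]
        · subst hai
          have hcbe := hcb b (by omega) hb
          by_cases hbit : mask.testBit (pvOff m a b - pvTri m a) = true
          · rw [if_neg (by rintro ⟨-, h, -⟩; omega : ¬(a < b ∧ a+1 ≤ a ∧ (mask >>> w).testBit (pvOff m a b - pvTri m (a+1)) = true)),
                if_neg hL2,
                if_pos (⟨rfl, by omega, by rw [hcbe]; exact hbit⟩ : a = a ∧ a < b ∧ chunk.testBit (b-a-1) = true),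
                if_pos (⟨hab, le_refl a, hbit⟩ : a < b ∧ a ≤ a ∧ mask.testBit (pvOff m a b - pvTri m a) = true)]
          · rw [if_neg (by rintro ⟨-, h, -⟩; omega : ¬(a < b ∧ a+1 ≤ a ∧ (mask >>> w).testBit (pvOff m a b - pvTri m (a+1)) = true)),
                if_neg hL2,
                if_neg (by rintro ⟨-, -, h⟩; rw [hcbe] at h; exact hbit h : ¬(a = a ∧ a < b ∧ chunk.testBit (b-a-1) = true)),
                if_neg hC2,
                if_neg (by rintro ⟨-, -, h⟩; exact hbit h : ¬(a < b ∧ a ≤ a ∧ mask.testBit (pvOff m a b - pvTri m a) = true)),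
                if_neg hR2]
        · have hse := hsb a b hab hb (by omega)
          by_cases hbit : mask.testBit (pvOff m a b - pvTri m i) = true
          · rw [if_pos (⟨hab, by omega, by rw [hse]; exact hbit⟩ : a < b ∧ i+1 ≤ a ∧ (mask >>> w).testBit (pvOff m a b - pvTri m (i+1)) = true),
                if_pos (⟨hab, by omega, hbit⟩ : a < b ∧ i ≤ a ∧ mask.testBit (pvOff m a b - pvTri m i) = true)]
          · rw [if_neg (by rintro ⟨-, -, h⟩; rw [hse] at h; exact hbit h : ¬(a < b ∧ i+1 ≤ a ∧ (mask >>> w).testBit (pvOff m a b - pvTri m (i+1)) = true)),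
                if_neg hL2,
                if_neg (by rintro ⟨h, -, -⟩; omega : ¬(a = i ∧ i < b ∧ chunk.testBit (b-i-1) = true)),
                if_neg hC2,
                if_neg (by rintro ⟨-, -, h⟩; exact hbit h : ¬(a < b ∧ i ≤ a ∧ mask.testBit (pvOff m a b - pvTri m i) = true)),
                if_neg hR2]
      · subst hab
        rw [if_neg (by rintro ⟨h, -, -⟩; omega : ¬(a < a ∧ i+1 ≤ a ∧ (mask >>> w).testBit (pvOff m a a - pvTri m (i+1)) = true)),
            if_neg (by rintro ⟨h, -, -⟩; omega : ¬(a < a ∧ i+1 ≤ a ∧ (mask >>> w).testBit (pvOff m a a - pvTri m (i+1)) = true)),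
            if_neg (by rintro ⟨h1, h2, -⟩; omega : ¬(a = i ∧ i < a ∧ chunk.testBit (a-i-1) = true)),
            if_neg (by rintro ⟨h1, h2, -⟩; omega : ¬(a = i ∧ i < a ∧ chunk.testBit (a-i-1) = true)),
            if_neg (by rintro ⟨h, -, -⟩; omega : ¬(a < a ∧ i ≤ a ∧ mask.testBit (pvOff m a a - pvTri m i) = true)),
            if_neg (by rintro ⟨h, -, -⟩; omega : ¬(a < a ∧ i ≤ a ∧ mask.testBit (pvOff m a a - pvTri m i) = true))]
      · have hL1 : ¬(a < b ∧ i+1 ≤ a ∧ (mask >>> w).testBit (pvOff m a b - pvTri m (i+1)) = true) := by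
          rintro ⟨h, -, -⟩; omega
        have hC1 : ¬(a = i ∧ i < b ∧ chunk.testBit (b-i-1) = true) := by
          rintro ⟨h1, h2, -⟩; omega
        have hR1 : ¬(a < b ∧ i ≤ a ∧ mask.testBit (pvOff m a b - pvTri m i) = true) := by
          rintro ⟨h, -, -⟩; omega
        rcases Nat.lt_trichotomy b i with hbi | hbi | hbi
        · rw [if_neg hL1,
              if_neg (by rintro ⟨-, h, -⟩; omega : ¬(b < a ∧ i+1 ≤ b ∧ (mask >>> w).testBit (pvOff m b a - pvTri m (i+1)) = true)),
              if_neg hC1,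
              if_neg (by rintro ⟨h, -, -⟩; omega : ¬(b = i ∧ i < a ∧ chunk.testBit (a-i-1) = true)),
              if_neg hR1,
              if_neg (by rintro ⟨-, h, -⟩; omega : ¬(b < a ∧ i ≤ b ∧ mask.testBit (pvOff m b a - pvTri m i) = true))]
        · subst hbi
          have hcbe := hcb a (by omega) ha
          by_cases hbit : mask.testBit (pvOff m b a - pvTri m b) = true
          · rw [if_neg hL1,
                if_neg (by rintro ⟨-, h, -⟩; omega : ¬(b < a ∧ b+1 ≤ b ∧ (mask >>> w).testBit (pvOff m b a - pvTri m (b+1)) = true)),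
                if_neg hC1,
                if_pos (⟨rfl, by omega, by rw [hcbe]; exact hbit⟩ : b = b ∧ b < a ∧ chunk.testBit (a-b-1) = true),
                if_neg hR1,
                if_pos (⟨hab, le_refl b, hbit⟩ : b < a ∧ b ≤ b ∧ mask.testBit (pvOff m b a - pvTri m b) = true)]
          · rw [if_neg hL1,
                if_neg (by rintro ⟨-, h, -⟩; omega : ¬(b < a ∧ b+1 ≤ b ∧ (mask >>> w).testBit (pvOff m b a - pvTri m (b+1)) = true)),
                if_neg hC1,
                if_neg (by rintro ⟨-, -, h⟩; rw [hcbe] at h; exact hbit h : ¬(b = b ∧ b < a ∧ chunk.testBit (a-b-1) = true)),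
                if_neg hR1,
                if_neg (by rintro ⟨-, -, h⟩; exact hbit h : ¬(b < a ∧ b ≤ b ∧ mask.testBit (pvOff m b a - pvTri m b) = true))]
        · have hse := hsb b a hab ha (by omega)
          by_cases hbit : mask.testBit (pvOff m b a - pvTri m i) = true
          · rw [if_neg hL1,
                if_pos (⟨hab, by omega, by rw [hse]; exact hbit⟩ : b < a ∧ i+1 ≤ b ∧ (mask >>> w).testBit (pvOff m b a - pvTri m (i+1)) = true),
                if_neg hR1,
                if_pos (⟨hab, by omega, hbit⟩ : b < a ∧ i ≤ b ∧ mask.testBit (pvOff m b a - pvTri m i) = true)]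
          · rw [if_neg hL1,
                if_neg (by rintro ⟨-, -, h⟩; rw [hse] at h; exact hbit h : ¬(b < a ∧ i+1 ≤ b ∧ (mask >>> w).testBit (pvOff m b a - pvTri m (i+1)) = true)),
                if_neg hC1,
                if_neg (by rintro ⟨h, -, -⟩; omega : ¬(b = i ∧ i < a ∧ chunk.testBit (a-i-1) = true)),
                if_neg hR1,
                if_neg (by rintro ⟨-, -, h⟩; exact hbit h : ¬(b < a ∧ i ≤ b ∧ mask.testBit (pvOff m b a - pvTri m i) = true))]

lemma pv_even_tri (m : Nat) (hm : 1 ≤ m) : m * (m-1) / 2 = pvTri m m := by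
  have hev : Even ((m-1) * m) := by
    have := Nat.even_mul_succ_self (m-1)
    rwa [Nat.sub_add_cancel hm] at this
  obtain ⟨c, hc⟩ := hev
  have h2 : m * (m-1) = 2 * c := by
    have := Nat.mul_comm m (m-1)
    omega
  unfold pvTri
  rw [h2, Nat.mul_div_cancel_left c (by norm_num)]
  omega

lemma pv_matrix_ext {M N : List (List Int)} {m : Nat} (hM : pvShape M m) (hN : pvShape N m)
    (h : ∀ a b, a < m → b < m → pvGet2 M a b = pvGet2 N a b) : M = N := by
  apply List.ext_getElem
  · rw [hM.1, hN.1]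
  · intro a h1 h2
    have ha : a < m := by rw [hM.1] at h1; exact h1
    have hrowM : M[a].length = m := hM.2 _ (List.getElem_mem h1)
    have hrowN : N[a].length = m := hN.2 _ (List.getElem_mem h2)
    apply List.ext_getElem
    · rw [hrowM, hrowN]
    · intro b h3 h4
      have hb : b < m := by rw [hrowM] at h3; exact h3
      have := h a b ha hb
      unfold pvGet2 at this
      rwa [List.getD_eq_getElem M [] h1, List.getD_eq_getElem N [] h2,
           List.getD_eq_getElem _ 0 h3, List.getD_eq_getElem _ 0 h4] at this

lemma pv_A0_char (m : Nat) :
    pvShape ((PySem.List.pyRange 0 (m:Int)).map (fun i =>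
      (PySem.List.pyRange 0 (m:Int)).map (fun j => if j < i then (1:Int) else 0))) m ∧
    ∀ a b, a < m → b < m →
      pvGet2 ((PySem.List.pyRange 0 (m:Int)).map (fun i =>
        (PySem.List.pyRange 0 (m:Int)).map (fun j => if j < i then (1:Int) else 0))) a b
        = if b < a then 1 else 0 := by
  rw [PySem.List.pyRange_zero]
  simp only [Int.toNat_natCast, List.map_map]
  constructor
  · constructor
    · simp
    · intro row hrow
      simp only [List.mem_map] at hrow
      obtain ⟨x, -, hx⟩ := hrow
      rw [← hx]
      simp
  · intro a b ha hb
    unfold pvGet2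
    rw [List.getD_eq_getElem _ [] (by simpa using ha)]
    simp only [List.getElem_map, Function.comp_apply, List.getElem_range]
    rw [List.getD_eq_getElem _ 0 (by simpa using hb)]
    simp only [List.getElem_map, Function.comp_apply, List.getElem_range]
    by_cases h : b < a
    · rw [if_pos (by exact_mod_cast h : ((b:Int) < (a:Int))), if_pos h]
    · rw [if_neg (by exact_mod_cast h : ¬((b:Int) < (a:Int))), if_neg h]

lemma pv_b_char (bits : Int) (m : Nat) (hm : 1 ≤ m) :
    pvShape (bits_to_adj_alt bits (m:Int)) m ∧
    ∀ a b, a < m → b < m → pvGet2 (bits_to_adj_alt bits (m:Int)) a b = pvTgt bits m a b := by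
  have he : (if 0 < (m:Int) then (PySem.Int.floordiv ((m:Int)*((m:Int)-1)) 2).toNat else 0) = pvTri m m := by
    rw [if_pos (by exact_mod_cast hm)]
    have hcast : ((m:Int)) * ((m:Int) - 1) = ((m * (m-1) : Nat) : Int) := by
      have h1 : ((m:Int)) - 1 = ((m - 1 : Nat) : Int) := by omega
      rw [h1]
      push_cast
      ring
    rw [hcast, show (2:Int) = ((2:Nat):Int) from rfl, PySem.Int.floordiv_natCast,
        Int.toNat_natCast]
    exact pv_even_tri m hm
  have heq : bits_to_adj_alt bits (m:Int)
      = pvRowsLoop ((m:Int)).toNat ((m:Int)).toNat 0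
          (pvMask bits (if 0 < (m:Int) then (PySem.Int.floordiv ((m:Int)*((m:Int)-1)) 2).toNat else 0))
          ((PySem.List.pyRange 0 (m:Int)).map (fun i =>
            (PySem.List.pyRange 0 (m:Int)).map (fun j => if j < i then (1:Int) else 0))) := rfl
  obtain ⟨hshA0, hentA0⟩ := pv_A0_char m
  have hmask : pvMask bits (pvTri m m) < 2^(pvTri m m - pvTri m 0) := by
    rw [pv_tri_zero]
    simpa using pv_mask_lt bits (pvTri m m)
  obtain ⟨hshR, hentR⟩ := pv_rows_char m hm m 0 (pvMask bits (pvTri m m))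
    ((PySem.List.pyRange 0 (m:Int)).map (fun i =>
      (PySem.List.pyRange 0 (m:Int)).map (fun j => if j < i then (1:Int) else 0)))
    (by omega) (by omega) hmask hshA0
  rw [heq, he, Int.toNat_natCast]
  refine ⟨hshR, ?_⟩
  intro a b ha hb
  rw [hentR a b ha hb, pv_tri_zero]
  simp only [Nat.sub_zero]
  unfold pvTgt
  rcases Nat.lt_trichotomy a b with hab | hab | hab
  · have hoff := pv_off_lt m a b hab hb
    have hbit := pv_mask_testBit bits (pvTri m m) (pvOff m a b) hoff
    rw [if_pos hab, hbit]
    by_cases h : (pvMask bits (pvTri m m)).testBit (pvOff m a b) = true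
    · rw [if_pos (⟨hab, by omega, h⟩ : a < b ∧ 0 ≤ a ∧ (pvMask bits (pvTri m m)).testBit (pvOff m a b) = true),
          if_pos h]
    · rw [if_neg (by rintro ⟨-, -, hx⟩; exact h hx : ¬(a < b ∧ 0 ≤ a ∧ (pvMask bits (pvTri m m)).testBit (pvOff m a b) = true)),
          if_neg (by rintro ⟨hx, -, -⟩; omega : ¬(b < a ∧ 0 ≤ b ∧ (pvMask bits (pvTri m m)).testBit (pvOff m b a) = true)),
          hentA0 a b ha hb, if_neg (by omega), if_neg h]
  · subst hab
    rw [if_neg (by omega : ¬(a < a)), if_neg (by omega : ¬(a < a)),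
        if_neg (by rintro ⟨hx, -, -⟩; omega : ¬(a < a ∧ 0 ≤ a ∧ (pvMask bits (pvTri m m)).testBit (pvOff m a a) = true)),
        if_neg (by rintro ⟨hx, -, -⟩; omega : ¬(a < a ∧ 0 ≤ a ∧ (pvMask bits (pvTri m m)).testBit (pvOff m a a) = true)),
        hentA0 a a ha ha, if_neg (by omega)]
  · have hoff := pv_off_lt m b a hab ha
    have hbit := pv_mask_testBit bits (pvTri m m) (pvOff m b a) hoff
    rw [if_neg (by omega : ¬(a < b)), if_pos hab, hbit]
    by_cases h : (pvMask bits (pvTri m m)).testBit (pvOff m b a) = true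
    · rw [if_neg (by rintro ⟨hx, -, -⟩; omega : ¬(a < b ∧ 0 ≤ a ∧ (pvMask bits (pvTri m m)).testBit (pvOff m a b) = true)),
          if_pos (⟨hab, by omega, h⟩ : b < a ∧ 0 ≤ b ∧ (pvMask bits (pvTri m m)).testBit (pvOff m b a) = true),
          if_pos h]
      norm_num
    · rw [if_neg (by rintro ⟨hx, -, -⟩; omega : ¬(a < b ∧ 0 ≤ a ∧ (pvMask bits (pvTri m m)).testBit (pvOff m a b) = true)),
          if_neg (by rintro ⟨-, -, hx⟩; exact h hx : ¬(b < a ∧ 0 ≤ b ∧ (pvMask bits (pvTri m m)).testBit (pvOff m b a) = true)),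
          hentA0 a b ha hb, if_pos hab, if_neg h]
      norm_num

lemma pv_main (bits n : Int) : bits_to_adj bits n = bits_to_adj_alt bits n := by
  by_cases hn : 1 ≤ n
  · obtain ⟨m, rfl⟩ : ∃ m : Nat, n = (m : Int) := ⟨n.toNat, (Int.toNat_of_nonneg (by omega)).symm⟩
    have hm : 1 ≤ m := by exact_mod_cast hn
    rw [a_fold]
    obtain ⟨hshA, -, hentA⟩ := pv_outer bits m m (le_refl m)
    obtain ⟨hshB, hentB⟩ := pv_b_char bits m hm
    apply pv_matrix_ext (m := m) hshA hshB
    intro a b ha hb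
    rw [hentB a b ha hb]
    have := hentA a b ha hb
    rw [if_pos (by omega)] at this
    exact this
  · have hz : n.toNat = 0 := by omega
    have hr : PySem.List.pyRange 0 n = [] := by
      rw [PySem.List.pyRange_zero, hz]
      simp
    simp only [bits_to_adj, bits_to_adj_alt, hr, hz, List.map_nil, List.foldl_nil, pvRowsLoop]

-- ===== VERDICT (by name: the statement is the Claim_ definition above) =====
theorem bits_to_adj_spec : Claim_equal_bits_to_adj := by
  intro bits n _
  exact pv_main bits n
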